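-- pv_equiv track=rewrite | github.com/kh277/BOJ | 백준/Gold/3178. 코코스/코코스.py | countNode
-- ===== SOURCE A (Python) =====
-- def countNode(N, K, word):
--     result = K
--     word.sort()
--     for i in range(1, N):
--         connect = True
--         for j in range(K):
--             if connect == False:
--                 result += K-j
--                 break
--             elif word[i-1][j] != word[i][j]:
--                 result += 1
--                 connect = False
--
--     return result
-- ===== SOURCE B (Python) =====
-- def countNode(N, K, word):
--     # The first word always opens K trie nodes; every later word adds one node
--     # for each of its prefixes (lengths 1..K) not seen before.  word.sort() is
--     # kept: the original sorts the list in place, and the first N words are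
--     # taken from the sorted list.
--     word.sort()
--     count = K
--     seen = set()
--     for i, w in enumerate(word[:max(N, 0)]):
--         for j in range(1, K + 1):
--             p = w[:j]
--             if p in seen:
--                 continue
--             seen.add(p)
--             if i > 0:
--                 count += 1
--     return count
-- ===== Notes on version B (the rewrite author's own statement) =====
-- stated objective: alternative
-- what changed: Replaces A's sorted-adjacent-pair common-prefix summation with break/flag bookkeeping by direct trie-node counting: the first word opens K nodes, and a set of seen prefixes counts, for every later word, the prefixes (lengths 1..K) not seen before; word.sort() is kept for the in-place side effect and to pick the same first N words.
-- outside the precondition, e.g. on countNode(2, 2, ['b', 'aa']): A returns 4, B returns 3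
import Mathlib
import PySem

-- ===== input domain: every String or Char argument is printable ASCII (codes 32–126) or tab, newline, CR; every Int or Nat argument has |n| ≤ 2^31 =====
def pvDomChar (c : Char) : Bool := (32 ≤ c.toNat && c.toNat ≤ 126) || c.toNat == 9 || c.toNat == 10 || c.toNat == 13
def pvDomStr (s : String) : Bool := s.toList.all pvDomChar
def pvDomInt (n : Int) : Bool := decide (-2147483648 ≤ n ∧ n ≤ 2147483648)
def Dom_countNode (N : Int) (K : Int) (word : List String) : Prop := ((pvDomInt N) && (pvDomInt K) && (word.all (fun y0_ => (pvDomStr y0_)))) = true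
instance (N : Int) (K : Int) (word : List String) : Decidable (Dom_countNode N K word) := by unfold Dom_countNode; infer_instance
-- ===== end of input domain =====

-- B counts the distinct prefixes (the trie nodes) with a set, instead of A's
-- sorted-adjacent-pair summation; A sorts `word` in place and B keeps that
-- side effect (the equivalence proved here is about the return value).

-- ===== PORT A =====
-- inner 'for j in range(K)' of A, with state (result, connect) and break;
-- none = IndexError from word[i-1][j] / word[i][j]
def jloopA (sw : List String) (i : Int) (K : Int) : List Int → Int → Bool → Option Int
  | [], r, _ => some r
  | j :: js, r, connect =>
    if connect = false then some (r + (K - j))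
    else
      match (PySem.List.pyGet? sw (i-1)).bind (fun w => PySem.Str.pyGet? w j),
            (PySem.List.pyGet? sw i).bind (fun w => PySem.Str.pyGet? w j) with
      | some c1, some c2 =>
        if c1 ≠ c2 then jloopA sw i K js (r+1) false
        else jloopA sw i K js r connect
      | _, _ => none

-- outer 'for i in range(1, N)' of A
def iloopA (sw : List String) (K : Int) : List Int → Int → Option Int
  | [], r => some r
  | i :: is, r =>
    match jloopA sw i K (PySem.List.pyRange 0 K) r true with
    | some r' => iloopA sw K is r'
    | none => none

def countNode (N : Int) (K : Int) (word : List String) : Int :=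
  let sw := PySem.List.sorted word (fun x => x)
  (iloopA sw K (PySem.List.pyRange 1 N) K).getD 0

-- ===== PORT B =====
def countNode_alt (N : Int) (K : Int) (word : List String) : Int :=
  let sw := PySem.List.sorted word (fun x => x)
  let res := (PySem.List.enumerate (PySem.List.slice sw none (some (max N 0)))).foldl
      (fun st iw =>
        (PySem.List.pyRange 1 (K+1)).foldl
          (fun st j =>
            let p := PySem.Str.slice iw.2 none (some j)
            if PySem.Set.contains st.2 p then st
            else ((if 0 < iw.1 then st.1 + 1 else st.1), PySem.Set.add st.2 p))
          st)
      (K, PySem.Set.empty)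
  res.1

-- ===== PRECONDITION & SPEC =====
-- Pre_ excludes positive N, K for which the list has fewer than N words or a
-- word shorter than K — input malformed for this problem (N words of length K):
-- there A raises IndexError on most inputs and on the rest returns a count that
-- assumes K readable characters per word.
def Pre_countNode (N : Int) (K : Int) (word : List String) : Prop :=
  N ≤ 1 ∨ K ≤ 0 ∨ (N ≤ (word.length : Int) ∧ ∀ w ∈ word, K ≤ (w.toList.length : Int))
instance (N : Int) (K : Int) (word : List String) : Decidable (Pre_countNode N K word) := by
  unfold Pre_countNode; infer_instance

def pvWitness_countNode : Int × Int × List String := (2, 1, ["a", "b"])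

def Spec_countNode (N : Int) (K : Int) (word : List String) (out : Int) : Prop :=
  out = countNode_alt N K word
instance (N : Int) (K : Int) (word : List String) (out : Int) : Decidable (Spec_countNode N K word out) := by
  unfold Spec_countNode; infer_instance

-- ===== CLAIM (what is proved, stated in full; the proofs are below) =====
def Claim_equal_countNode : Prop := ∀ (N : Int) (K : Int) (word : List String), Dom_countNode N K word → Pre_countNode N K word → Spec_countNode N K word (countNode N K word)

-- ===== LEMMAS AND PROOFS =====

-- ---- easy evaluations of the two ports on the degenerate regions ----

theorem jloopA_nil (sw : List String) (i K r : Int) (c : Bool) :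
    jloopA sw i K [] r c = some r := rfl

theorem jloopA_false_cons (sw : List String) (i K r j : Int) (js : List Int) :
    jloopA sw i K (j :: js) r false = some (r + (K - j)) := by
  simp [jloopA]

theorem iloopA_K_nonpos (sw : List String) (K : Int) (hK : K ≤ 0) :
    ∀ (is_ : List Int) (r : Int), iloopA sw K is_ r = some r := by
  intro is_
  induction is_ with
  | nil => intro r; rfl
  | cons i t ih =>
    intro r
    simp [iloopA, PySem.List.pyRange_one_eq_nil hK, jloopA_nil, ih]

theorem A_K_nonpos (N K : Int) (word : List String) (hK : K ≤ 0) :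
    countNode N K word = K := by
  simp [countNode, iloopA_K_nonpos _ _ hK]

theorem A_N_le_one (N K : Int) (word : List String) (hN : N ≤ 1) :
    countNode N K word = K := by
  simp [countNode, PySem.List.pyRange_one_eq_nil hN, iloopA]

theorem B_K_nonpos (N K : Int) (word : List String) (hK : K ≤ 0) :
    countNode_alt N K word = K := by
  have h : K + 1 ≤ 1 := by omega
  simp [countNode_alt, PySem.List.pyRange_one_eq_nil h]

theorem B_N_nonpos (N K : Int) (word : List String) (hN : N ≤ 0) :
    countNode_alt N K word = K := by
  have h : max N 0 = 0 := by omega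
  simp [countNode_alt, h, PySem.List.slice_to _ (le_refl (0 : Int))]

-- ---- common-prefix machinery on character lists ----

def lcp : List Char → List Char → Nat
  | a :: as, b :: bs => if a = b then lcp as bs + 1 else 0
  | _, _ => 0

theorem lcp_nil_left (w : List Char) : lcp [] w = 0 := by cases w <;> rfl

theorem lcp_le_left (u v : List Char) : lcp u v ≤ u.length := by
  induction u generalizing v with
  | nil => simp [lcp_nil_left]
  | cons a as ih =>
    cases v with
    | nil => simp [lcp]
    | cons b bs =>
      by_cases h : a = b <;> simp [lcp, h, Nat.succ_le_succ (ih bs)]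

theorem lcp_self (u : List Char) : lcp u u = u.length := by
  induction u with
  | nil => rfl
  | cons a as ih => simp [lcp, ih]

theorem take_lcp_eq (u v : List Char) : ∀ j, j ≤ lcp u v → u.take j = v.take j := by
  induction u generalizing v with
  | nil => intro j hj; simp [lcp_nil_left] at hj; simp [hj]
  | cons a as ih =>
    intro j hj
    cases v with
    | nil => simp [lcp] at hj; simp [hj]
    | cons b bs =>
      by_cases h : a = b
      · cases j with
        | zero => simp
        | succ j' =>
          simp [lcp, h] at hj
          simp [h, List.take_succ_cons, ih bs j' (by omega)]
      · simp [lcp, h] at hj; simp [hj]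

theorem le_lcp_of_take_eq (u v : List Char) :
    ∀ j, u.take j = v.take j → j ≤ u.length → j ≤ lcp u v := by
  induction u generalizing v with
  | nil => intro j _ hl; simp at hl; omega
  | cons a as ih =>
    intro j heq hl
    cases j with
    | zero => omega
    | succ j' =>
      cases v with
      | nil => simp at heq
      | cons b bs =>
        simp [List.take_succ_cons] at heq
        obtain ⟨hab, htail⟩ := heq
        simp at hl
        have := ih bs j' htail (by omega)
        simp [lcp, hab]; omega

theorem lcp_getElem (u v : List Char) :
    ∀ j, j < lcp u v → u[j]? = v[j]? := by
  induction u generalizing v with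
  | nil => intro j hj; simp [lcp_nil_left] at hj
  | cons a as ih =>
    intro j hj
    cases v with
    | nil => simp [lcp] at hj
    | cons b bs =>
      by_cases h : a = b
      · cases j with
        | zero => simp [h]
        | succ j' =>
          simp [lcp, h] at hj
          simpa using ih bs j' (by omega)
      · simp [lcp, h] at hj

theorem lcp_eq_of_mismatch (u v : List Char) (j : Nat)
    (hag : u.take j = v.take j) (hju : j < u.length) (hjv : j < v.length)
    (hne : u[j] ≠ v[j]) : lcp u v = j := by
  have h1 : j ≤ lcp u v := le_lcp_of_take_eq u v j hag (by omega)
  by_contra h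
  have hj : j < lcp u v := by omega
  have := lcp_getElem u v j hj
  rw [List.getElem?_eq_getElem hju, List.getElem?_eq_getElem hjv] at this
  exact hne (by simpa using this)

-- the order PySem's sort puts on strings, read on character lists
def LexLE (u v : List Char) : Prop := u = v ∨ List.Lex (· < ·) u v

theorem strLE_iff (s t : String) : s ≤ t ↔ LexLE s.toList t.toList := by
  rw [le_iff_lt_or_eq, String.lt_iff_toList_lt]
  unfold LexLE
  constructor
  · rintro (h | h)
    · exact Or.inr h
    · exact Or.inl (by rw [h])
  · rintro (h | h)
    · exact Or.inr (by apply String.ext; simpa [String.toList] using h)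
    · exact Or.inl h

theorem lcp_mono_lex (u : List Char) :
    ∀ v w, List.Lex (· < ·) u v → List.Lex (· < ·) v w → lcp u w ≤ lcp u v := by
  induction u with
  | nil => intro v w _ _; simp [lcp_nil_left]
  | cons a as ih =>
    intro v w h1 h2
    cases h1 with
    | rel hab =>
      rename_i b bs
      cases h2 with
      | rel hbc =>
        rename_i c cs
        have : a ≠ c := by intro h; rw [h] at hab; exact absurd (hab.trans hbc) (lt_irrefl c)
        simp [lcp, this]
      | cons h2' =>
        rename_i cs
        simp [lcp, ne_of_lt hab]
    | cons h1' =>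
      rename_i bs
      cases h2 with
      | rel hbc =>
        rename_i c cs
        simp [lcp, ne_of_lt hbc]
      | cons h2' =>
        rename_i cs
        simp [lcp, ih bs cs h1' h2']

theorem lcp_mono (u v w : List Char) (h1 : LexLE u v) (h2 : LexLE v w) :
    lcp u w ≤ lcp u v := by
  cases h1 with
  | inl h => subst h; cases h2 with
    | inl h => subst h; exact le_refl _
    | inr h => exact le_of_le_of_eq (lcp_le_left u w) (lcp_self u).symm
  | inr h1' => cases h2 with
    | inl h => subst h; exact le_refl _
    | inr h2' => exact lcp_mono_lex u v w h1' h2'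

-- ---- the prefix multiset and A's additive count ----

def pfxs (Kn : Nat) (w : List Char) : List (List Char) :=
  (List.range Kn).map (fun j => w.take (j+1))

def allP (Kn : Nat) (s : List (List Char)) : List (List Char) := s.flatMap (pfxs Kn)

def addC (Kn : Nat) : List (List Char) → Nat
  | u :: v :: t => (Kn - min (lcp u v) Kn) + addC Kn (v :: t)
  | _ => 0

theorem addC_short (Kn : Nat) (l : List (List Char)) (h : l.length ≤ 1) :
    addC Kn l = 0 := by
  match l with
  | [] => rfl
  | [_] => rfl
  | _ :: _ :: _ => simp at h

theorem mem_pfxs (Kn : Nat) (w p : List Char) :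
    p ∈ pfxs Kn w ↔ ∃ j : Nat, j < Kn ∧ p = w.take (j+1) := by
  simp [pfxs, eq_comm]

theorem card_pfxs (Kn : Nat) (w : List Char) (h : Kn ≤ w.length) :
    (pfxs Kn w).toFinset.card = Kn := by
  have hnd : (pfxs Kn w).Nodup := by
    apply List.Nodup.map_on _ (List.nodup_range)
    intro x hx y hy hxy
    have hx' : x + 1 ≤ w.length := by simp at hx; omega
    have hy' : y + 1 ≤ w.length := by simp at hy; omega
    have := congrArg List.length hxy
    simp [List.length_take, Nat.min_eq_left hx', Nat.min_eq_left hy'] at this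
    omega
  rw [List.toFinset_card_of_nodup hnd]
  simp [pfxs]

theorem card_allP (Kn : Nat) (_hK : 0 < Kn) :
    ∀ (s : List (List Char)), s ≠ [] → s.Pairwise LexLE →
      (∀ w ∈ s, Kn ≤ w.length) →
      (allP Kn s).toFinset.card = Kn + addC Kn s := by
  intro s
  induction s with
  | nil => intro h; exact absurd rfl h
  | cons u rest ih =>
    intro _ hsort hlen
    cases rest with
    | nil =>
      have : allP Kn [u] = pfxs Kn u := by simp [allP]
      rw [this, card_pfxs Kn u (hlen u (by simp))]
      simp [addC]
    | cons v t =>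
      have hlu : Kn ≤ u.length := hlen u (by simp)
      have hlv : Kn ≤ v.length := hlen v (by simp)
      obtain ⟨hu_all, htail⟩ := List.pairwise_cons.1 hsort
      have huv : LexLE u v := hu_all v (by simp)
      have hvw : ∀ w ∈ v :: t, LexLE v w := by
        intro w hw
        rcases List.mem_cons.1 hw with h | h
        · exact Or.inl h.symm
        · exact (List.pairwise_cons.1 htail).1 w h
      set m := min (lcp u v) Kn with hm
      set A := (pfxs Kn u).toFinset with hA
      set B := (allP Kn (v :: t)).toFinset with hB
      have hsplit : (allP Kn (u :: v :: t)).toFinset = A ∪ B := by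
        simp [allP, List.flatMap_cons, hA, hB]
      have hmemB : ∀ p, p ∈ B ↔ ∃ w ∈ v :: t, ∃ j : Nat, j < Kn ∧ p = w.take (j+1) := by
        intro p
        simp only [hB, List.mem_toFinset, allP, List.mem_flatMap]
        constructor
        · rintro ⟨w, hw, hp⟩; exact ⟨w, hw, (mem_pfxs Kn w p).1 hp⟩
        · rintro ⟨w, hw, hj⟩; exact ⟨w, hw, (mem_pfxs Kn w p).2 hj⟩
      have hsdiff : A \ B = (Finset.Ioc m Kn).image (fun j => u.take j) := by
        apply Finset.ext
        intro p
        simp only [Finset.mem_sdiff, Finset.mem_image, Finset.mem_Ioc]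
        constructor
        · rintro ⟨hpA, hpB⟩
          rw [hA, List.mem_toFinset, mem_pfxs] at hpA
          obtain ⟨j, hjK, hp⟩ := hpA
          refine ⟨j + 1, ⟨?_, by omega⟩, hp.symm⟩
          by_contra hJm
          have hJlcp : j + 1 ≤ lcp u v := by omega
          have : p = v.take (j+1) := by
            rw [hp]; exact take_lcp_eq u v (j+1) hJlcp
          exact hpB ((hmemB p).2 ⟨v, by simp, j, hjK, this⟩)
        · rintro ⟨j, ⟨hmj, hjK⟩, hp⟩
          have hj1 : 1 ≤ j := by omega
          constructor
          · rw [hA, List.mem_toFinset, mem_pfxs]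
            exact ⟨j - 1, by omega, by rw [← hp]; congr 1; omega⟩
          · intro hpB
            obtain ⟨w, hw, j', hj'K, hp'⟩ := (hmemB p).1 hpB
            have hlw : Kn ≤ w.length := hlen w (List.mem_cons_of_mem u hw)
            have hlenp1 : p.length = j := by
              rw [← hp]; simp [List.length_take]; omega
            have hlenp2 : p.length = j' + 1 := by
              rw [hp']; simp [List.length_take]; omega
            have hjj : j = j' + 1 := by omega
            have htk : u.take j = w.take j := by rw [hp, hp', hjj]
            have h1 : j ≤ lcp u w := le_lcp_of_take_eq u w j htk (by omega)
            have h2 : lcp u w ≤ lcp u v := lcp_mono u v w huv (hvw w hw)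
            omega
      have hcard_sdiff : (A \ B).card = Kn - m := by
        rw [hsdiff]
        rw [Finset.card_image_of_injOn]
        · rw [Nat.card_Ioc]
        · intro x hx y hy hxy
          simp only [Finset.mem_coe, Finset.mem_Ioc] at hx hy
          have := congrArg List.length hxy
          simp only [List.length_take] at this
          omega
      have hcardB : B.card = Kn + addC Kn (v :: t) := by
        exact ih (by simp) htail (fun w hw => hlen w (List.mem_cons_of_mem u hw))
      rw [hsplit, ← Finset.card_sdiff_add_card A B, hcard_sdiff, hcardB]
      have : addC Kn (u :: v :: t) = (Kn - m) + addC Kn (v :: t) := by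
        simp [addC, hm]
      omega

-- ---- A's loops compute the additive count ----

theorem jloop_run (sw : List String) (i K : Int) (wu wv : String)
    (hu : PySem.List.pyGet? sw (i-1) = some wu) (hv : PySem.List.pyGet? sw i = some wv)
    (hlu : K ≤ (wu.toList.length : Int)) (hlv : K ≤ (wv.toList.length : Int)) :
    ∀ (n : Nat) (j : Int), (K - j).toNat = n → 0 ≤ j → j ≤ K →
      wu.toList.take j.toNat = wv.toList.take j.toNat →
      ∀ r, jloopA sw i K (PySem.List.pyRange j K) r true
        = some (r + ((K.toNat - min (lcp wu.toList wv.toList) K.toNat : Nat) : Int)) := by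
  intro n
  induction n with
  | zero =>
    intro j hn hj0 hjK hag r
    have hjK' : j = K := by omega
    subst hjK'
    rw [PySem.List.pyRange_one_eq_nil (le_refl j), jloopA_nil]
    have hle : j.toNat ≤ lcp wu.toList wv.toList :=
      le_lcp_of_take_eq _ _ j.toNat hag (by omega)
    have hmin : min (lcp wu.toList wv.toList) j.toNat = j.toNat := by omega
    rw [hmin]
    simp
  | succ n ih =>
    intro j hn hj0 hjK hag r
    have hjK' : j < K := by omega
    rw [PySem.List.pyRange_one_cons hjK']
    have hju : j.toNat < wu.toList.length := by omega
    have hjv : j.toNat < wv.toList.length := by omega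
    have hgu : (PySem.List.pyGet? sw (i-1)).bind (fun w => PySem.Str.pyGet? w j)
        = some (wu.toList[j.toNat]) := by
      rw [hu, Option.bind_some]
      have h := PySem.Str.pyGet?_natCast wu j.toNat
      rw [Int.toNat_of_nonneg hj0] at h
      rw [h]
      exact List.getElem?_eq_getElem hju
    have hgv : (PySem.List.pyGet? sw i).bind (fun w => PySem.Str.pyGet? w j)
        = some (wv.toList[j.toNat]) := by
      rw [hv, Option.bind_some]
      have h := PySem.Str.pyGet?_natCast wv j.toNat
      rw [Int.toNat_of_nonneg hj0] at h
      rw [h]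
      exact List.getElem?_eq_getElem hjv
    by_cases hc : wu.toList[j.toNat] = wv.toList[j.toNat]
    · have hstep : jloopA sw i K (j :: PySem.List.pyRange (j+1) K) r true
          = jloopA sw i K (PySem.List.pyRange (j+1) K) r true := by
        conv_lhs => rw [jloopA]
        rw [hgu, hgv]
        simp [hc]
      rw [hstep]
      apply ih (j+1) (by omega) (by omega) (by omega) _ r
      have h1 : (j+1).toNat = j.toNat + 1 := by omega
      rw [h1, List.take_add_one, List.take_add_one, hag,
        List.getElem?_eq_getElem hju, List.getElem?_eq_getElem hjv, hc]
    · have hlcp : lcp wu.toList wv.toList = j.toNat :=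
        lcp_eq_of_mismatch _ _ j.toNat hag hju hjv hc
      have hstep : jloopA sw i K (j :: PySem.List.pyRange (j+1) K) r true
          = jloopA sw i K (PySem.List.pyRange (j+1) K) (r+1) false := by
        conv_lhs => rw [jloopA]
        rw [hgu, hgv]
        simp [hc]
      rw [hstep, hlcp]
      by_cases h2 : j + 1 < K
      · rw [PySem.List.pyRange_one_cons h2, jloopA_false_cons]
        congr 1
        omega
      · rw [PySem.List.pyRange_one_eq_nil (by omega), jloopA_nil]
        congr 1
        omega

theorem iloop_run (sw : List String) (K N : Int)
    (hall : ∀ w ∈ sw.take N.toNat, K ≤ (w.toList.length : Int)) (hK : 0 < K)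
    (hN : N ≤ (sw.length : Int)) :
    ∀ (n : Nat) (a : Int), (N - a).toNat = n → 1 ≤ a → a ≤ N →
      ∀ r, iloopA sw K (PySem.List.pyRange a N) r
        = some (r + ((addC K.toNat (((sw.map String.toList).take N.toNat).drop (a-1).toNat) : Nat) : Int)) := by
  intro n
  induction n with
  | zero =>
    intro a hn ha1 haN r
    have haN' : a = N := by omega
    subst haN'
    rw [PySem.List.pyRange_one_eq_nil (le_refl a)]
    have hlen : (((sw.map String.toList).take a.toNat).drop (a-1).toNat).length ≤ 1 := by
      simp [List.length_drop, List.length_take]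
      omega
    rw [addC_short _ _ hlen]
    simp [iloopA]
  | succ n ih =>
    intro a hn ha1 haN r
    have haN' : a < N := by omega
    rw [PySem.List.pyRange_one_cons haN']
    have hia : a.toNat < sw.length := by omega
    have hia1 : (a-1).toNat < sw.length := by omega
    have hu : PySem.List.pyGet? sw (a-1) = some (sw[(a-1).toNat]) :=
      PySem.List.pyGet?_eq_some_getElem sw (by omega) (by omega)
    have hv : PySem.List.pyGet? sw a = some (sw[a.toNat]) :=
      PySem.List.pyGet?_eq_some_getElem sw (by omega) (by omega)
    have htake : ∀ (m : Nat) (hm : m < N.toNat), sw[m]'(by omega) ∈ sw.take N.toNat := by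
      intro m hm
      have hh : m < (sw.take N.toNat).length := by simp; omega
      have := List.getElem_take (xs := sw) (i := m) (j := N.toNat) (h := hh)
      rw [← this]
      exact List.getElem_mem hh
    have hlu : K ≤ ((sw[(a-1).toNat]).toList.length : Int) :=
      hall _ (htake (a-1).toNat (by omega))
    have hlv : K ≤ ((sw[a.toNat]).toList.length : Int) :=
      hall _ (htake a.toNat (by omega))
    have hjl := jloop_run sw a K _ _ hu hv hlu hlv K.toNat 0 (by omega) (by omega)
      (by omega) (by simp) r
    have hstep : iloopA sw K (a :: PySem.List.pyRange (a+1) N) r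
        = iloopA sw K (PySem.List.pyRange (a+1) N)
            (r + ((K.toNat - min (lcp (sw[(a-1).toNat]).toList (sw[a.toNat]).toList) K.toNat : Nat) : Int)) := by
      conv_lhs => rw [iloopA]
      rw [hjl]
    rw [hstep, ih (a+1) (by omega) (by omega) (by omega)]
    -- unfold one cons of addC
    set L := (sw.map String.toList).take N.toNat with hL
    have hLlen : L.length = N.toNat := by
      simp [hL]
      omega
    have h1 : (a-1).toNat < L.length := by omega
    have h2 : a.toNat < L.length := by omega
    have hd1 : L.drop (a-1).toNat = L[(a-1).toNat] :: L.drop ((a-1).toNat + 1) :=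
      List.drop_eq_getElem_cons h1
    have hsucc : (a-1).toNat + 1 = a.toNat := by omega
    have hd2 : L.drop a.toNat = L[a.toNat] :: L.drop (a.toNat + 1) :=
      List.drop_eq_getElem_cons h2
    have hg1 : L[(a-1).toNat] = (sw[(a-1).toNat]).toList := by
      simp [hL, List.getElem_take, List.getElem_map]
    have hg2 : L[a.toNat] = (sw[a.toNat]).toList := by
      simp [hL, List.getElem_take, List.getElem_map]
    have haddC : addC K.toNat (L.drop (a-1).toNat)
        = (K.toNat - min (lcp (sw[(a-1).toNat]).toList (sw[a.toNat]).toList) K.toNat)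
          + addC K.toNat (L.drop a.toNat) := by
      rw [hd1, hsucc, hd2, hg1, hg2]
      rw [show addC K.toNat ((sw[(a-1).toNat]).toList :: (sw[a.toNat]).toList :: L.drop (a.toNat + 1))
          = (K.toNat - min (lcp (sw[(a-1).toNat]).toList (sw[a.toNat]).toList) K.toNat)
            + addC K.toNat ((sw[a.toNat]).toList :: L.drop (a.toNat + 1)) from rfl]
    have harg : ((a+1)-1).toNat = a.toNat := by omega
    rw [harg, haddC]
    congr 1
    push_cast
    ring

-- ---- B's fold counts the new prefixes word by word ----

def gp (K : Int) (w : String) : List String :=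
  (PySem.List.pyRange 1 (K+1)).map (fun j => PySem.Str.slice w none (some j))

def stepFn (i : Int) (st : Int × PySem.Set String) (p : String) : Int × PySem.Set String :=
  if PySem.Set.contains st.2 p then st
  else ((if 0 < i then st.1 + 1 else st.1), PySem.Set.add st.2 p)

theorem inner_as_gp (K : Int) (iw : Int × String) (st : Int × PySem.Set String) :
    (PySem.List.pyRange 1 (K+1)).foldl
          (fun st j =>
            let p := PySem.Str.slice iw.2 none (some j)
            if PySem.Set.contains st.2 p then st
            else ((if 0 < iw.1 then st.1 + 1 else st.1), PySem.Set.add st.2 p))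
          st
      = (gp K iw.2).foldl (stepFn iw.1) st := by
  rw [gp, List.foldl_map]
  rfl

theorem word_run (i : Int) : ∀ (ps : List String) (c : Int) (S : PySem.Set String),
    ps.foldl (stepFn i) (c, S)
      = ((if 0 < i then c + (((PySem.Set.update S ps).length : Int) - (S.length : Int)) else c),
         PySem.Set.update S ps) := by
  intro ps
  induction ps with
  | nil =>
    intro c S
    simp [PySem.Set.update]
  | cons p ps ih =>
    intro c S
    by_cases hc : p ∈ S
    · have h1 : PySem.Set.contains S p = true := by simp [PySem.Set.contains, hc]
      have h2 : PySem.Set.add S p = S := by simp [PySem.Set.add, hc]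
      have hupd : PySem.Set.update S (p :: ps) = PySem.Set.update S ps := by
        simp [PySem.Set.update, h2]
      rw [List.foldl_cons, stepFn, h1, if_pos rfl, ih c S, hupd]
    · have h1 : PySem.Set.contains S p = false := by simp [PySem.Set.contains, hc]
      have hlen : (PySem.Set.add S p).length = S.length + 1 := by
        simp [PySem.Set.add, hc]
      have hupd : PySem.Set.update S (p :: ps) = PySem.Set.update (PySem.Set.add S p) ps := by
        simp [PySem.Set.update]
      rw [List.foldl_cons, stepFn, h1]
      simp only [Bool.false_eq_true, if_false]
      rw [ih _ _, hupd, hlen]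
      split_ifs
      · simp
        ring
      · simp

theorem update_append (S : PySem.Set String) (a b : List String) :
    PySem.Set.update S (a ++ b) = PySem.Set.update (PySem.Set.update S a) b := by
  simp [PySem.Set.update, List.foldl_append]

theorem rest_run (K : Int) : ∀ (xs : List (Int × String)), (∀ p ∈ xs, 0 < p.1) →
    ∀ (c : Int) (S : PySem.Set String),
    xs.foldl (fun st iw => (gp K iw.2).foldl (stepFn iw.1) st) (c, S)
      = (c + ((PySem.Set.update S (xs.flatMap (fun iw => gp K iw.2))).length : Int)
          - (S.length : Int),
         PySem.Set.update S (xs.flatMap (fun iw => gp K iw.2))) := by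
  intro xs
  induction xs with
  | nil =>
    intro _ c S
    simp [PySem.Set.update]
  | cons x xs ih =>
    intro hpos c S
    rw [List.foldl_cons, word_run, if_pos (hpos x (by simp))]
    rw [ih (fun p hp => hpos p (List.mem_cons_of_mem x hp))]
    rw [List.flatMap_cons, update_append]
    rw [Prod.ext_iff]
    exact ⟨by ring, rfl⟩

theorem mem_enumerate_le : ∀ (xs : List String) (s : Int) (p : Int × String),
    p ∈ PySem.List.enumerate xs s → s ≤ p.1 := by
  intro xs
  induction xs with
  | nil => intro s p hp; simp [PySem.List.enumerate] at hp
  | cons x xs ih =>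
    intro s p hp
    rw [show PySem.List.enumerate (x :: xs) s = (s, x) :: PySem.List.enumerate xs (s+1) from rfl] at hp
    rcases List.mem_cons.1 hp with h | h
    · rw [h]
    · have := ih (s+1) p h
      omega

theorem enum_flatMap (K : Int) : ∀ (xs : List String) (s : Int),
    (PySem.List.enumerate xs s).flatMap (fun iw => gp K iw.2) = xs.flatMap (gp K) := by
  intro xs
  induction xs with
  | nil => intro s; rfl
  | cons x xs ih =>
    intro s
    rw [show PySem.List.enumerate (x :: xs) s = (s, x) :: PySem.List.enumerate xs (s+1) from rfl]
    rw [List.flatMap_cons, List.flatMap_cons, ih]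

theorem ofList_length_card {β : Type} [BEq β] [LawfulBEq β] [DecidableEq β] (L : List β) :
    (PySem.Set.ofList L).length = L.toFinset.card := by
  have hset : (PySem.Set.ofList L).toFinset = L.toFinset := by
    apply Finset.ext; intro a
    simp [List.mem_toFinset, PySem.Set.mem_ofList L a]
  rw [← hset, List.toFinset_card_of_nodup (PySem.Set.nodup_ofList L)]

theorem ofList_as_update {β : Type} [BEq β] (a : List β) :
    PySem.Set.ofList a = PySem.Set.update PySem.Set.empty a := by
  rw [PySem.Set.ofList_eq_foldl]
  rfl

theorem ofList_append_update {β : Type} [BEq β] (a b : List β) :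
    PySem.Set.ofList (a ++ b) = PySem.Set.update (PySem.Set.update PySem.Set.empty a) b := by
  rw [PySem.Set.ofList_eq_foldl, List.foldl_append]
  rfl

theorem pyRange_one_map : ∀ (n : Nat) (a b : Int), (b - a).toNat = n →
    PySem.List.pyRange a b = (List.range n).map (fun k : Nat => a + (k : Int)) := by
  intro n
  induction n with
  | zero =>
    intro a b hn
    rw [PySem.List.pyRange_one_eq_nil (by omega)]
    simp
  | succ n ih =>
    intro a b hn
    rw [PySem.List.pyRange_one_cons (by omega), ih (a+1) b (by omega),
      List.range_succ_eq_map]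
    simp only [List.map_cons, List.map_map]
    congr 1
    · norm_num
    · apply List.map_congr_left
      intro k _
      simp only [Function.comp_apply]
      push_cast
      ring

theorem main_case (N K : Int) (word : List String) (hK : 0 < K) (hN : 1 ≤ N)
    (hlen : N ≤ (word.length : Int))
    (hall : ∀ w ∈ (PySem.List.sorted word (fun x => x)).take N.toNat, K ≤ (w.toList.length : Int)) :
    countNode N K word = countNode_alt N K word := by
  set sw := PySem.List.sorted word (fun x => x) with hsw
  have hperm : sw.Perm word := PySem.List.sorted_perm word (fun x => x) false
  have hswlen : sw.length = word.length := hperm.length_eq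
  have hallsw : ∀ w ∈ sw.take N.toNat, K ≤ (w.toList.length : Int) := hall
  have hNsw : N ≤ (sw.length : Int) := by omega
  -- A side
  have hA : countNode N K word
      = K + ((addC K.toNat ((sw.map String.toList).take N.toNat) : Nat) : Int) := by
    rw [countNode]
    rw [iloop_run sw K N hallsw hK hNsw (N-1).toNat 1 (by omega) (by omega) hN K]
    simp
  -- B side
  have hmax : max N 0 = N := by omega
  set Kn := K.toNat with hKn
  have hne : sw.take N.toNat ≠ [] := by
    apply List.ne_nil_of_length_pos
    simp
    omega
  obtain ⟨w0, rest, hT⟩ := List.exists_cons_of_ne_nil hne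
  have hfeq : (fun (st : Int × PySem.Set String) (iw : Int × String) =>
        (PySem.List.pyRange 1 (K+1)).foldl
          (fun st j =>
            let p := PySem.Str.slice iw.2 none (some j)
            if PySem.Set.contains st.2 p then st
            else ((if 0 < iw.1 then st.1 + 1 else st.1), PySem.Set.add st.2 p))
          st)
      = (fun st iw => (gp K iw.2).foldl (stepFn iw.1) st) := by
    funext st iw
    exact inner_as_gp K iw st
  have hBval : countNode_alt N K word
      = K + ((PySem.Set.ofList ((w0 :: rest).flatMap (gp K))).length : Int)
          - ((PySem.Set.ofList (gp K w0)).length : Int) := by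
    rw [countNode_alt]
    simp only [← hsw]
    rw [hmax, PySem.List.slice_to _ (by omega : (0:Int) ≤ N), hT, hfeq]
    rw [show PySem.List.enumerate (w0 :: rest) = ((0:Int), w0) :: PySem.List.enumerate rest 1 from rfl]
    rw [List.foldl_cons, word_run, if_neg (by omega : ¬ (0:Int) < 0)]
    rw [rest_run K _ (fun p hp => by have := mem_enumerate_le rest 1 p hp; omega)]
    rw [enum_flatMap, List.flatMap_cons,
      ofList_append_update (gp K w0) (List.flatMap (gp K) rest), ofList_as_update (gp K w0)]
  -- identify the two set sizes with prefix counts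
  have hslice : ∀ (w : String) (k : Nat),
      (PySem.Str.slice w none (some ((k+1 : Nat) : Int))).toList = w.toList.take (k+1) := by
    intro w k
    have h1 := PySem.List.slice_to (w.toList) (b := (k:Int)+1) (by omega)
    have h2 : ((k:Int)+1).toNat = k+1 := by omega
    rw [h2] at h1
    simp [PySem.Str.slice, h1]
  have hrange : PySem.List.pyRange 1 (K+1) = (List.range Kn).map (fun k => ((k+1 : Nat) : Int)) := by
    rw [pyRange_one_map Kn 1 (K+1) (by omega)]
    apply List.map_congr_left
    intro k _
    push_cast
    ring
  have hfun : (fun w => (gp K w).map String.toList) = (fun w : String => pfxs Kn w.toList) := by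
    funext w
    rw [gp]
    simp only [List.map_map]
    rw [hrange, List.map_map, pfxs]
    apply List.map_congr_left
    intro k _
    simp only [Function.comp_apply]
    exact hslice w k
  have hinj : Function.Injective String.toList := by
    intro a b h
    apply String.ext
    simpa [String.toList] using h
  have hcard_map : ∀ L : List String, L.toFinset.card = (L.map String.toList).toFinset.card := by
    intro L
    have himg : (L.map String.toList).toFinset = L.toFinset.image String.toList := by
      apply Finset.ext
      intro b
      simp
    rw [himg, Finset.card_image_of_injective _ hinj]
  set s' := (sw.map String.toList).take N.toNat with hs'
  have hs'len : s'.length = N.toNat := by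
    simp [hs']
    omega
  have hs'ne : s' ≠ [] := by
    apply List.ne_nil_of_length_pos
    omega
  have hs'sort : s'.Pairwise LexLE := by
    apply List.Pairwise.sublist (List.take_sublist _ _)
    apply (List.pairwise_map).mpr
    exact (PySem.List.sorted_pairwise word (fun x => x)).imp (fun h => (strLE_iff _ _).1 h)
  have hs'lens : ∀ w ∈ s', Kn ≤ w.length := by
    intro w hw
    rw [hs', ← List.map_take] at hw
    obtain ⟨x, hx, rfl⟩ := List.mem_map.1 hw
    have := hallsw x hx
    omega
  have hmapped : ((w0 :: rest).flatMap (gp K)).map String.toList = allP Kn s' := by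
    rw [← hT, hs', ← List.map_take, allP, List.flatMap_map, List.map_flatMap]
    rw [show (fun w => List.map String.toList (gp K w)) = (fun w : String => pfxs Kn w.toList) from hfun]
  have hw0len : Kn ≤ w0.toList.length := by
    have := hallsw w0 (hT ▸ List.mem_cons_self ..)
    omega
  have hcard0 : (PySem.Set.ofList (gp K w0)).length = Kn := by
    rw [ofList_length_card, hcard_map]
    rw [show (gp K w0).map String.toList = pfxs Kn w0.toList from congrFun hfun w0]
    exact card_pfxs Kn w0.toList hw0len
  have hcardAll : (PySem.Set.ofList ((w0 :: rest).flatMap (gp K))).length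
      = Kn + addC Kn s' := by
    rw [ofList_length_card, hcard_map, hmapped]
    exact card_allP Kn (by omega) s' hs'ne hs'sort hs'lens
  rw [hA, hBval, hcard0, hcardAll]
  push_cast
  ring_nf

-- ===== VERDICT =====

theorem B_N_le_one (N K : Int) (word : List String) (hN : N ≤ 1) :
    countNode_alt N K word = K := by
  by_cases h0 : N ≤ 0
  · exact B_N_nonpos N K word h0
  · have h1 : max N 0 = 1 := by omega
    rw [countNode_alt, h1, PySem.List.slice_to _ (by omega : (0:Int) ≤ 1)]
    cases PySem.List.sorted word (fun x => x) with
    | nil => rfl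
    | cons w0 tl =>
      rw [show List.take (1:Int).toNat (w0 :: tl) = [w0] from rfl]
      rw [show PySem.List.enumerate [w0] = [((0:Int), w0)] from rfl]
      rw [List.foldl_cons, List.foldl_nil, inner_as_gp K ((0:Int), w0), word_run,
        if_neg (by omega : ¬ (0:Int) < 0)]

theorem countNode_spec : Claim_equal_countNode := by
  intro N K word _ hpre
  unfold Spec_countNode
  unfold Pre_countNode at hpre
  by_cases hK : K ≤ 0
  · rw [A_K_nonpos _ _ _ hK, B_K_nonpos _ _ _ hK]
  · by_cases hN : N ≤ 1
    · rw [A_N_le_one _ _ _ hN, B_N_le_one _ _ _ hN]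
    · rcases hpre with h | h | h
      · omega
      · omega
      · exact main_case N K word (by omega) (by omega) h.1
          (fun w hw => h.2 w
            ((PySem.List.sorted_perm word (fun x => x) false).mem_iff.1 (List.mem_of_mem_take hw)))
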